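-- pv_equiv track=rewrite | github.com/FJingxian/JanusX | python/janusx/script/gblupbench.py | _parse_engines
-- ===== SOURCE A (Python) =====
-- def _normalize_engine_token(token: str) -> str:
--     t = str(token).strip().lower().replace("-", "").replace("_", "")
--     if t in {"janusxrrblup", "jxrrblup", "janusrrblup", "jxrr", "janusxrr"}:
--         return "janusxrrblup"
--     if t in {"janusx", "jx", "janus"}:
--         return "janusx"
--     if t in {"sommer"}:
--         return "sommer"
--     if t in {"rrblup", "rrb", "rr"}:
--         return "rrblup"
--     if t in {"blupf90", "blup90", "f90"}:
--         return "blupf90"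
--     if t in {"blupf90apy", "blup90apy", "f90apy", "ssblupapy", "ssgblupapy"}:
--         return "blupf90apy"
--     if t in {"hiblup", "hib", "hbl"}:
--         return "hiblup"
--     return ""
--
-- def _parse_engines(raw: str) -> list[str]:
--     out: list[str] = []
--     seen: set[str] = set()
--     for part in str(raw).split(","):
--         e = _normalize_engine_token(part)
--         if not e or e in seen:
--             continue
--         seen.add(e)
--         out.append(e)
--     return out
-- ===== SOURCE B (Python) =====
-- _GROUPS = [
--     ("janusxrrblup", {"janusxrrblup", "jxrrblup", "janusrrblup", "jxrr", "janusxrr"}),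
--     ("janusx", {"janusx", "jx", "janus"}),
--     ("sommer", {"sommer"}),
--     ("rrblup", {"rrblup", "rrb", "rr"}),
--     ("blupf90", {"blupf90", "blup90", "f90"}),
--     ("blupf90apy", {"blupf90apy", "blup90apy", "f90apy", "ssblupapy", "ssgblupapy"}),
--     ("hiblup", {"hiblup", "hib", "hbl"}),
-- ]
--
-- def _parse_engines(raw: str) -> list[str]:
--     # Engine-first algorithm: for each of the 7 engine groups find the position of the
--     # first token naming it, then emit the engines found, ordered by that position.
--     # Correct because the alias groups are disjoint, so a token names at most one
--     # engine and first-occurrence positions of distinct engines never collide.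
--     toks = [p.strip().lower().replace("-", "").replace("_", "") for p in str(raw).split(",")]
--     firsts = []
--     for canon, aliases in _GROUPS:
--         pos = next((i for i, t in enumerate(toks) if t in aliases), None)
--         if pos is not None:
--             firsts.append((pos, canon))
--     firsts.sort(key=lambda e: e[0])
--     return [c for _, c in firsts]
-- ===== Notes on version B (the rewrite author's own statement) =====
-- stated objective: alternative
-- what changed: B inverts the loop structure: instead of normalizing each token and deduplicating with an order-preserving seen set, it scans the token list once per engine group for the first position of any alias of that group and then sorts the found engines by that first-occurrence position.
import Mathlib
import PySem

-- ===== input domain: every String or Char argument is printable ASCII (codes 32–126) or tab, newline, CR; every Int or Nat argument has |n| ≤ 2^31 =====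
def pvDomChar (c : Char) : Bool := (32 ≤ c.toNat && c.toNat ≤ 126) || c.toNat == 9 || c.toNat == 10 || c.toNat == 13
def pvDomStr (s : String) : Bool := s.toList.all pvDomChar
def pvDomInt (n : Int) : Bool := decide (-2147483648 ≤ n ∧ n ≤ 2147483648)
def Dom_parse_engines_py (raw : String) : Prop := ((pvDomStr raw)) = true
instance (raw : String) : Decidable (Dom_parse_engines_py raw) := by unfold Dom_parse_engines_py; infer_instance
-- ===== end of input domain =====

-- B inverts the loop structure: instead of a seen-set dedup over normalized tokens, it finds,
-- per engine group, the first token position naming that group, and sorts engines by it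
-- (objective: alternative, same cost).

-- ===== PORT A =====
-- t = str(token).strip().lower().replace("-", "").replace("_", "")
def normalize_engine_token (token : String) : String :=
  let t := PySem.Str.replace (PySem.Str.replace (PySem.Str.lower (PySem.Str.strip token)) "-" "") "_" ""
  if ["janusxrrblup", "jxrrblup", "janusrrblup", "jxrr", "janusxrr"].contains t then "janusxrrblup"
  else if ["janusx", "jx", "janus"].contains t then "janusx"
  else if ["sommer"].contains t then "sommer"
  else if ["rrblup", "rrb", "rr"].contains t then "rrblup"
  else if ["blupf90", "blup90", "f90"].contains t then "blupf90"
  else if ["blupf90apy", "blup90apy", "f90apy", "ssblupapy", "ssgblupapy"].contains t then "blupf90apy"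
  else if ["hiblup", "hib", "hbl"].contains t then "hiblup"
  else ""

def parse_engines_py (raw : String) : List String :=
  let parts : List String := (PySem.Chars.splitOn raw.toList (",".toList)).map String.ofList
  let res := parts.foldl
    (fun (st : List String × PySem.Set String) part =>
      let e := normalize_engine_token part
      if e = "" ∨ st.2.contains e then st
      else (st.1 ++ [e], PySem.Set.add st.2 e))
    ([], PySem.Set.empty)
  res.1

-- ===== PORT B =====
-- _GROUPS in Source B: (canonical name, alias set) per engine
def engineGroups : List (String × List String) :=
  [("janusxrrblup", ["janusxrrblup", "jxrrblup", "janusrrblup", "jxrr", "janusxrr"]),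
   ("janusx", ["janusx", "jx", "janus"]),
   ("sommer", ["sommer"]),
   ("rrblup", ["rrblup", "rrb", "rr"]),
   ("blupf90", ["blupf90", "blup90", "f90"]),
   ("blupf90apy", ["blupf90apy", "blup90apy", "f90apy", "ssblupapy", "ssgblupapy"]),
   ("hiblup", ["hiblup", "hib", "hbl"])]

-- p.strip().lower().replace("-", "").replace("_", "")
def normTok (p : String) : String :=
  PySem.Str.replace (PySem.Str.replace (PySem.Str.lower (PySem.Str.strip p)) "-" "") "_" ""

def parse_engines_py_alt (raw : String) : List String :=
  let toks : List String :=
    ((PySem.Chars.splitOn raw.toList (",".toList)).map String.ofList).map normTok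
  -- for canon, aliases in _GROUPS: pos = next((i for i, t in enumerate(toks) if t in aliases), None)
  let firsts : List (Int × String) := engineGroups.foldl
    (fun (acc : List (Int × String)) g =>
      match ((PySem.List.enumerate toks 0).find? (fun p => g.2.contains p.2)).map (fun p => p.1) with
      | some pos => acc ++ [(pos, g.1)]
      | none => acc)
    []
  -- firsts.sort(key=lambda e: e[0]); return [c for _, c in firsts]
  (PySem.List.sorted firsts (fun e => e.1) false).map (fun e => e.2)

-- ===== PRECONDITION & SPEC =====
def Spec_parse_engines_py (raw : String) (out : List String) : Prop := out = parse_engines_py_alt raw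
instance (raw : String) (out : List String) : Decidable (Spec_parse_engines_py raw out) := by unfold Spec_parse_engines_py; infer_instance

-- ===== CLAIM (what is proved, stated in full; the proofs are below) =====
def Claim_equal_parse_engines_py : Prop := ∀ (raw : String), Dom_parse_engines_py raw → Spec_parse_engines_py raw (parse_engines_py raw)

-- ===== LEMMAS AND PROOFS =====

-- the pure alias if-chain of A's normalizer, on an already-transformed token
def chain (t : String) : String :=
  if ["janusxrrblup", "jxrrblup", "janusrrblup", "jxrr", "janusxrr"].contains t then "janusxrrblup"
  else if ["janusx", "jx", "janus"].contains t then "janusx"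
  else if ["sommer"].contains t then "sommer"
  else if ["rrblup", "rrb", "rr"].contains t then "rrblup"
  else if ["blupf90", "blup90", "f90"].contains t then "blupf90"
  else if ["blupf90apy", "blup90apy", "f90apy", "ssblupapy", "ssgblupapy"].contains t then "blupf90apy"
  else if ["hiblup", "hib", "hbl"].contains t then "hiblup"
  else ""

def canons : List String :=
  ["janusxrrblup", "janusx", "sommer", "rrblup", "blupf90", "blupf90apy", "hiblup"]

lemma groups_map_fst : engineGroups.map (fun g => g.1) = canons := rfl

-- A's loop invariant (out = seen as lists): the seen-set fold is filter-then-fold-add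
lemma loop_eq (f : String → String) (parts : List String) (acc : List String) :
    (parts.foldl
      (fun (st : List String × PySem.Set String) part =>
        let e := f part
        if e = "" ∨ st.2.contains e then st
        else (st.1 ++ [e], PySem.Set.add st.2 e))
      (acc, acc)).1
    = ((parts.map f).filter (fun h => h != "")).foldl PySem.Set.add acc := by
  induction parts generalizing acc with
  | nil => rfl
  | cons p ps ih =>
    rw [List.foldl_cons, List.map_cons, List.filter_cons]
    dsimp only
    by_cases he : f p = ""
    · rw [if_pos (Or.inl he), if_neg (by simp [he])]
      exact ih acc
    · by_cases hc : PySem.Set.contains acc (f p) = true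
      · rw [if_pos (Or.inr hc), if_pos (show (f p != "") = true by simp [he]), List.foldl_cons,
            show PySem.Set.add acc (f p) = acc from if_pos hc]
        exact ih acc
      · rw [if_neg (not_or.mpr ⟨he, hc⟩), if_pos (show (f p != "") = true by simp [he]), List.foldl_cons,
            show PySem.Set.add acc (f p) = acc ++ [f p] from if_neg hc]
        exact ih (acc ++ [f p])

-- per-group: membership in a group's alias set is "the chain maps it to this canon"
set_option maxRecDepth 8192 in
lemma group_pred (g : String × List String) (hg : g ∈ engineGroups) (t : String) :
    g.2.contains t = (chain t == g.1) := by
  by_cases h : t ∈ ["janusxrrblup", "jxrrblup", "janusrrblup", "jxrr", "janusxrr", "janusx", "jx", "janus", "sommer", "rrblup", "rrb", "rr", "blupf90", "blup90", "f90", "blupf90apy", "blup90apy", "f90apy", "ssblupapy", "ssgblupapy", "hiblup", "hib", "hbl"]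
  · fin_cases hg <;> fin_cases h <;> rfl
  · simp only [List.mem_cons, List.not_mem_nil, or_false, not_or] at h
    obtain ⟨h1,h2,h3,h4,h5,h6,h7,h8,h9,h10,h11,h12,h13,h14,h15,h16,h17,h18,h19,h20,h21,h22,h23⟩ := h
    have hch : chain t = "" := by
      unfold chain
      simp [h1,h2,h3,h4,h5,h6,h7,h8,h9,h10,h11,h12,h13,h14,h15,h16,h17,h18,h19,h20,h21,h22,h23]
    rw [hch]
    fin_cases hg <;>
      simp [h1,h2,h3,h4,h5,h6,h7,h8,h9,h10,h11,h12,h13,h14,h15,h16,h17,h18,h19,h20,h21,h22,h23]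

-- chain values are "" or canonical
lemma chain_filter_pred (t : String) : (chain t != "") = canons.contains (chain t) := by
  unfold chain; split_ifs <;> rfl

-- B's group loop is a filterMap
lemma foldl_find_filterMap (toks : List String) (l : List (String × List String))
    (acc : List (Int × String)) :
    l.foldl
      (fun (acc : List (Int × String)) g =>
        match ((PySem.List.enumerate toks 0).find? (fun p => g.2.contains p.2)).map (fun p => p.1) with
        | some pos => acc ++ [(pos, g.1)]
        | none => acc) acc
    = acc ++ l.filterMap
        (fun g => ((PySem.List.enumerate toks 0).find? (fun p => g.2.contains p.2)).map
          (fun p => (p.1, g.1))) := by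
  induction l generalizing acc with
  | nil => simp
  | cons g gs ih =>
    rw [List.foldl_cons, List.filterMap_cons]
    cases hf : (PySem.List.enumerate toks 0).find? (fun p => g.2.contains p.2) with
    | none => simp only [Option.map_none]; exact ih acc
    | some p => simp only [Option.map_some]; rw [ih (acc ++ [(p.1, g.1)])]; simp

lemma enum_fst_inj {ts : List String} {s : Int} {p q : Int × String}
    (hp : p ∈ PySem.List.enumerate ts s) (hq : q ∈ PySem.List.enumerate ts s)
    (h : p.1 = q.1) : p = q := by
  rw [PySem.List.mem_enumerate_iff] at hp hq
  obtain ⟨k, hk, rfl⟩ := hp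
  obtain ⟨j, hj, rfl⟩ := hq
  have h' : s + (k : Int) = s + (j : Int) := h
  have hkj : k = j := by omega
  subst hkj; rfl

lemma enum_fst_le {ts : List String} {s : Int} {p : Int × String}
    (hp : p ∈ PySem.List.enumerate ts s) : s ≤ p.1 := by
  rw [PySem.List.mem_enumerate_iff] at hp
  obtain ⟨k, hk, rfl⟩ := hp
  simp

-- first-occurrence positions of distinct canons are distinct
lemma firstsNe (f : String → String) (ts : List String) (s : Int) (cs : List String)
    (h : cs.Nodup) :
    (cs.filterMap (fun c => ((PySem.List.enumerate ts s).find? (fun p => f p.2 == c)).map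
      (fun p => (p.1, c)))).Pairwise (fun a b => a.1 ≠ b.1) := by
  rw [List.pairwise_filterMap]
  refine h.imp ?_
  intro c c' hne b hb b' hb'
  rw [Option.map_eq_some_iff] at hb hb'
  obtain ⟨p, hp, rfl⟩ := hb
  obtain ⟨q, hq, rfl⟩ := hb'
  intro heq
  have hpq : p = q :=
    enum_fst_inj (List.mem_of_find?_eq_some hp) (List.mem_of_find?_eq_some hq) heq
  have h1 := List.find?_some hp
  have h2 := List.find?_some hq
  rw [beq_iff_eq] at h1 h2
  subst hpq
  exact hne (h1.symm.trans h2)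

-- folding add over a list skips elements already in the accumulator
lemma foldl_add_skip {x : String} (xs : List String) :
    ∀ (a : PySem.Set String), a.contains x = true →
      xs.foldl PySem.Set.add a = (xs.filter (fun y => y != x)).foldl PySem.Set.add a := by
  induction xs with
  | nil => intro a _; rfl
  | cons y ys ih =>
    intro a ha
    rw [List.foldl_cons, List.filter_cons]
    by_cases hyx : y = x
    · subst hyx
      rw [show PySem.Set.add a y = a from if_pos ha]
      rw [if_neg (by simp)]
      exact ih a ha
    · rw [if_pos (by simp [hyx]), List.foldl_cons]
      apply ih
      unfold PySem.Set.add
      split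
      · exact ha
      · simpa using Or.inl (by simpa using ha)

-- core: the seen-set fold over filtered chain values equals B's
-- sort-groups-by-first-occurrence list
lemma core (f : String → String) (toks : List String) :
    ∀ (s : Int) (cs : List String) (acc : List String),
      cs.Nodup → "" ∉ cs → (∀ c ∈ cs, acc.contains c = false) →
      ((toks.map f).filter (fun c => cs.contains c)).foldl PySem.Set.add acc
        = acc ++ (PySem.List.sorted
            (cs.filterMap (fun c => ((PySem.List.enumerate toks s).find? (fun p => f p.2 == c)).map
              (fun p => (p.1, c))))
            (fun e => e.1) false).map (fun e => e.2) := by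
  induction toks with
  | nil =>
    intro s cs acc _ _ _
    simp [PySem.List.enumerate_nil, PySem.List.sorted_eq_nil_iff]
  | cons t ts ih =>
    intro s cs acc hnd hblank hacc
    rw [List.map_cons, List.filter_cons]
    by_cases hmem : cs.contains (f t) = true
    · rw [if_pos hmem, List.foldl_cons]
      have hftmem : f t ∈ cs := by simpa using hmem
      have haccft : acc.contains (f t) = false := hacc _ hftmem
      have hadd : PySem.Set.add acc (f t) = acc ++ [f t] := if_neg (by simpa using haccft)
      rw [hadd]
      -- skip later occurrences of (f t): they are already in the accumulator
      have hskip : ((ts.map f).filter (fun c => cs.contains c)).foldl PySem.Set.add (acc ++ [f t])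
          = (((ts.map f).filter (fun c => cs.contains c)).filter (fun y => y != f t)).foldl
              PySem.Set.add (acc ++ [f t]) := by
        apply foldl_add_skip
        simp
      rw [hskip, List.filter_filter]
      have hfc : ∀ a, ((a != f t) && cs.contains a) = (cs.erase (f t)).contains a := by
        intro a
        by_cases ha : a ∈ cs.erase (f t)
        · have := (hnd.mem_erase_iff).mp ha
          simp [ha, this.1, this.2]
        · by_cases hax : a = f t
          · subst hax; simp [ha]
          · have hacs : a ∉ cs := fun hm => ha ((hnd.mem_erase_iff).mpr ⟨hax, hm⟩)
            simp [ha, hacs]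
      rw [List.filter_congr (fun a _ => hfc a)]
      rw [ih (s + 1) (cs.erase (f t)) (acc ++ [f t]) (hnd.erase _)
            (fun hm => hblank (List.mem_of_mem_erase hm))
            (fun c hc => by
              have h1 := (hnd.mem_erase_iff).mp hc
              have h2 : c ∉ acc := by simpa using hacc c h1.2
              simp [h2, h1.1])]
      -- now identify the sorted lists
      have hsorted :
          PySem.List.sorted
            (cs.filterMap (fun c => ((PySem.List.enumerate (t :: ts) s).find? (fun p => f p.2 == c)).map
              (fun p => (p.1, c)))) (fun e => e.1) false
          = (s, f t) :: PySem.List.sorted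
              ((cs.erase (f t)).filterMap (fun c => ((PySem.List.enumerate ts (s + 1)).find? (fun p => f p.2 == c)).map
                (fun p => (p.1, c)))) (fun e => e.1) false := by
        apply PySem.List.sorted_eq_of_perm_of_pairwise_lt
        · -- permutation
          have hperm1 : cs.Perm (f t :: cs.erase (f t)) := List.perm_cons_erase hftmem
          have hcongr : (cs.erase (f t)).filterMap
              (fun c => ((PySem.List.enumerate (t :: ts) s).find? (fun p => f p.2 == c)).map
                (fun p => (p.1, c)))
              = (cs.erase (f t)).filterMap
                (fun c => ((PySem.List.enumerate ts (s + 1)).find? (fun p => f p.2 == c)).map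
                  (fun p => (p.1, c))) := by
            apply List.filterMap_congr
            intro c hc
            have hne : f t ≠ c := fun he => ((hnd.mem_erase_iff).mp hc).1 he.symm
            rw [PySem.List.enumerate_cons, List.find?_cons_of_neg (by simp [hne])]
          have hhead : ((PySem.List.enumerate (t :: ts) s).find? (fun p => f p.2 == (f t))).map
              (fun p => (p.1, f t)) = some (s, f t) := by
            rw [PySem.List.enumerate_cons, List.find?_cons_of_pos (by simp)]
            rfl
          have hcons : (f t :: cs.erase (f t)).filterMap
              (fun c => ((PySem.List.enumerate (t :: ts) s).find? (fun p => f p.2 == c)).map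
                (fun p => (p.1, c)))
              = ((s, f t) : Int × String) :: (cs.erase (f t)).filterMap
                (fun c => ((PySem.List.enumerate ts (s + 1)).find? (fun p => f p.2 == c)).map
                  (fun p => (p.1, c))) := by
            simp only [List.filterMap_cons, hhead, hcongr]
          refine ((PySem.List.sorted_perm _ _ _).cons _).trans ?_
          rw [← hcons]
          exact (List.Perm.filterMap _ hperm1).symm
        · -- strictly increasing by fst
          constructor
          · intro y hy
            have hy' : y ∈ (cs.erase (f t)).filterMap
                (fun c => ((PySem.List.enumerate ts (s + 1)).find? (fun p => f p.2 == c)).map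
                  (fun p => (p.1, c))) := ((PySem.List.sorted_perm _ _ _).mem_iff).mp hy
            rw [List.mem_filterMap] at hy'
            obtain ⟨c, _, hc⟩ := hy'
            rw [Option.map_eq_some_iff] at hc
            obtain ⟨p, hp, rfl⟩ := hc
            have := enum_fst_le (List.mem_of_find?_eq_some hp)
            show s < p.1
            omega
          · have hle := PySem.List.sorted_pairwise
              ((cs.erase (f t)).filterMap (fun c => ((PySem.List.enumerate ts (s + 1)).find? (fun p => f p.2 == c)).map
                (fun p => (p.1, c)))) (fun e => e.1)
            have hne := (List.Perm.pairwise_iff (fun h => Ne.symm h)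
              (PySem.List.sorted_perm _ (fun (e : Int × String) => e.1) false)).mpr
              (firstsNe f ts (s + 1) (cs.erase (f t)) (hnd.erase _))
            exact (hle.and hne).imp (fun h => lt_of_le_of_ne h.1 h.2)
      rw [hsorted]
      simp
    · rw [if_neg hmem]
      have hcongr : cs.filterMap
          (fun c => ((PySem.List.enumerate (t :: ts) s).find? (fun p => f p.2 == c)).map
            (fun p => (p.1, c)))
          = cs.filterMap
            (fun c => ((PySem.List.enumerate ts (s + 1)).find? (fun p => f p.2 == c)).map
              (fun p => (p.1, c))) := by
        apply List.filterMap_congr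
        intro c hc
        have hne : f t ≠ c := fun he => hmem (by simpa using he ▸ hc)
        rw [PySem.List.enumerate_cons, List.find?_cons_of_neg (by simp [hne])]
      rw [hcongr]
      exact ih (s + 1) cs acc hnd hblank hacc

-- ===== VERDICT (by name: the statement is the Claim_ definition above) =====
set_option maxHeartbeats 1000000 in
theorem parse_engines_py_spec : Claim_equal_parse_engines_py := by
  intro raw _
  show parse_engines_py raw = parse_engines_py_alt raw
  show (((PySem.Chars.splitOn raw.toList (",".toList)).map String.ofList).foldl
      (fun (st : List String × PySem.Set String) part =>
        let e := normalize_engine_token part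
        if e = "" ∨ st.2.contains e then st
        else (st.1 ++ [e], PySem.Set.add st.2 e)) ([], [])).1
    = (PySem.List.sorted
        (engineGroups.foldl
          (fun (acc : List (Int × String)) g =>
            match ((PySem.List.enumerate
                (((PySem.Chars.splitOn raw.toList (",".toList)).map String.ofList).map normTok)
                0).find? (fun p => g.2.contains p.2)).map (fun p => p.1) with
            | some pos => acc ++ [(pos, g.1)]
            | none => acc)
          [])
        (fun e => e.1) false).map (fun e => e.2)
  rw [loop_eq normalize_engine_token
        ((PySem.Chars.splitOn raw.toList (",".toList)).map String.ofList) []]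
  rw [foldl_find_filterMap
        (((PySem.Chars.splitOn raw.toList (",".toList)).map String.ofList).map normTok)
        engineGroups []]
  rw [List.nil_append]
  rw [show ((PySem.Chars.splitOn raw.toList (",".toList)).map String.ofList).map
        normalize_engine_token
      = (((PySem.Chars.splitOn raw.toList (",".toList)).map String.ofList).map normTok).map chain
      from by simp only [List.map_map]; rfl]
  generalize (((PySem.Chars.splitOn raw.toList (",".toList)).map String.ofList).map normTok) = toks
  have hfilter : (toks.map chain).filter (fun h => h != "")
      = (toks.map chain).filter (fun c => canons.contains c) := by
    apply List.filter_congr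
    intro x hx
    obtain ⟨t, _, rfl⟩ := List.mem_map.mp hx
    exact chain_filter_pred t
  rw [hfilter]
  have hgroups : engineGroups.filterMap
      (fun g => ((PySem.List.enumerate toks 0).find? (fun p => g.2.contains p.2)).map
        (fun p => (p.1, g.1)))
      = canons.filterMap
        (fun c => ((PySem.List.enumerate toks 0).find? (fun p => chain p.2 == c)).map
          (fun p => (p.1, c))) := by
    rw [← groups_map_fst, List.filterMap_map]
    apply List.filterMap_congr
    intro g hg
    have hpred : (fun p : Int × String => g.2.contains p.2)
        = (fun p : Int × String => chain p.2 == g.1) := funext (fun p => group_pred g hg p.2)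
    simp only [Function.comp_apply, hpred]
  rw [hgroups]
  rw [core chain toks 0 canons [] (by decide) (by decide) (fun c _ => rfl), List.nil_append]
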